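-- pv_equiv track=rewrite | github.com/IshayTelavivi/my_ds_course | recursion_practice.py | find_first_word
-- ===== SOURCE A (Python) =====
-- def find_first_word(sentence, bank_of_words):
--     """
--     The function finds the first word in a sentence, given a bank of words. It adds a letter each time to the
--     developing word, and when it matches a word in the bank it returns it
--     :param sentence: a string of letters
--     :param bank_of_words: a list of legitimate words
--     :return: a string with the first word
--     """
--
--     letter_gathering = []
--     for letter in sentence:
--         potential_word = ''.join(letter_gathering) + letter
--         if potential_word in bank_of_words:
--             return potential_word
--         else:
--             letter_gathering.append(letter)
-- ===== SOURCE B (Python) =====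
-- def find_first_word(sentence, bank_of_words):
--     """Filter the bank down to non-empty prefixes of the sentence, then
--     return the shortest one (None if there is none)."""
--     candidates = [w for w in bank_of_words if w and sentence.startswith(w)]
--     if candidates:
--         return min(candidates, key=len)
--     return None
-- ===== Notes on version B (the rewrite author's own statement) =====
-- stated objective: faster
-- what changed: B scans the word bank once, keeping the non-empty words that are prefixes of the sentence and returning the shortest candidate, instead of A's growing a prefix letter by letter (rebuilding it with join each step) and linearly searching the bank for it at every letter.
import Mathlib
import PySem

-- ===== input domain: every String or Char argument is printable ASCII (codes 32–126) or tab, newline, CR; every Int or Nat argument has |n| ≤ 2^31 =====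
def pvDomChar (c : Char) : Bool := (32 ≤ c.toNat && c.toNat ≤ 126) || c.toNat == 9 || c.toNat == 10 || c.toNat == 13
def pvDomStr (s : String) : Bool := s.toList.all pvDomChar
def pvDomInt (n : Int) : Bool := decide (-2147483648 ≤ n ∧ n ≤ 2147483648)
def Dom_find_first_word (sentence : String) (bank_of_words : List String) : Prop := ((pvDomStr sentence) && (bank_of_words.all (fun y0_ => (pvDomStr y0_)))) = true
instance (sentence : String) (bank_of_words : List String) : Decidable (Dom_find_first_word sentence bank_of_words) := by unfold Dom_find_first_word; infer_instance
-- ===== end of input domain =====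

-- B filters the bank for non-empty prefixes of the sentence and returns the shortest one,
-- instead of A's growing a prefix letter by letter and testing it for membership in the bank.


-- ===== PORT A =====
-- the for-loop over the sentence's letters, with letter_gathering as the accumulator
def pvGoA (bank : List String) (acc : List Char) : List Char → Option String
  | [] => none
  | c :: rest =>
    if String.ofList (acc ++ [c]) ∈ bank then some (String.ofList (acc ++ [c]))
    else pvGoA bank (acc ++ [c]) rest

def find_first_word (sentence : String) (bank_of_words : List String) : Option String :=
  pvGoA bank_of_words [] sentence.toList

-- ===== PORT B =====
def find_first_word_alt (sentence : String) (bank_of_words : List String) : Option String :=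
  let candidates := bank_of_words.filter (fun w => !(w == "") && PySem.Str.startswith sentence w)
  PySem.List.min? candidates PySem.Str.len

-- ===== PRECONDITION & SPEC =====
def Spec_find_first_word (sentence : String) (bank_of_words : List String) (out : Option String) : Prop := out = find_first_word_alt sentence bank_of_words
instance (sentence : String) (bank_of_words : List String) (out : Option String) : Decidable (Spec_find_first_word sentence bank_of_words out) := by unfold Spec_find_first_word; infer_instance

-- ===== CLAIM (what is proved, stated in full; the proofs are below) =====
def Claim_equal_find_first_word : Prop := ∀ (sentence : String) (bank_of_words : List String), Dom_find_first_word sentence bank_of_words → Spec_find_first_word sentence bank_of_words (find_first_word sentence bank_of_words)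

-- ===== LEMMAS AND PROOFS =====

-- the list of non-empty prefixes A tries, in order
def pvPrefs (acc : List Char) : List Char → List String
  | [] => []
  | c :: rest => String.ofList (acc ++ [c]) :: pvPrefs (acc ++ [c]) rest

theorem pvGoA_eq_find? (cs : List Char) (acc : List Char) (bank : List String) :
    pvGoA bank acc cs = (pvPrefs acc cs).find? (fun w => decide (w ∈ bank)) := by
  induction cs generalizing acc with
  | nil => rfl
  | cons c rest ih =>
    simp only [pvGoA, pvPrefs]
    by_cases h : String.ofList (acc ++ [c]) ∈ bank
    · rw [if_pos h, List.find?_cons_of_pos (by simpa using h)]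
    · rw [if_neg h, List.find?_cons_of_neg (by simpa using h)]
      exact ih _

theorem mem_pvPrefs (cs : List Char) (acc : List Char) (w : String) :
    w ∈ pvPrefs acc cs ↔ ∃ k, 1 ≤ k ∧ k ≤ cs.length ∧ w = String.ofList (acc ++ cs.take k) := by
  induction cs generalizing acc with
  | nil => simp [pvPrefs]
  | cons c rest ih =>
    simp only [pvPrefs, List.mem_cons, ih]
    constructor
    · rintro (rfl | ⟨k, h1, h2, rfl⟩)
      · exact ⟨1, by simp⟩
      · exact ⟨k + 1, by omega, by simp; omega, by simp⟩
    · rintro ⟨k, h1, h2, rfl⟩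
      match k, h1 with
      | 1, _ => left; simp
      | (k' + 2), _ =>
        right
        exact ⟨k' + 1, by omega, by simp at h2 ⊢; omega, by simp⟩

theorem len_lt_of_mem_pvPrefs (cs : List Char) (acc : List Char) (w : String)
    (h : w ∈ pvPrefs acc cs) : acc.length < w.toList.length := by
  rcases (mem_pvPrefs cs acc w).mp h with ⟨k, h1, h2, rfl⟩
  simp
  omega

theorem pvPrefs_pairwise (cs : List Char) (acc : List Char) :
    (pvPrefs acc cs).Pairwise (fun a b => a.toList.length < b.toList.length) := by
  induction cs generalizing acc with
  | nil => exact List.Pairwise.nil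
  | cons c rest ih =>
    refine List.Pairwise.cons (fun w hw => ?_) (ih (acc ++ [c]))
    have := len_lt_of_mem_pvPrefs rest (acc ++ [c]) w hw
    simp at this ⊢
    omega

-- B's filter condition holds exactly on the prefixes A tries
theorem pvPred_iff (s w : String) :
    ((!(w == "")) && PySem.Str.startswith s w) = true ↔ w ∈ pvPrefs [] s.toList := by
  rw [mem_pvPrefs]
  simp only [Bool.and_eq_true, Bool.not_eq_true', beq_eq_false_iff_ne, ne_eq,
    PySem.Str.startswith_eq, PySem.Chars.startswith_iff]
  constructor
  · rintro ⟨hne, hpre⟩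
    refine ⟨w.toList.length, ?_, hpre.length_le, ?_⟩
    · have : w.toList ≠ [] := fun h => hne (by
        have := congrArg String.ofList h; simpa using this)
      cases hL : w.toList with
      | nil => exact absurd hL this
      | cons a l => simp
    · have := List.prefix_iff_eq_take.mp hpre
      rw [List.nil_append, ← this]
      simp
  · rintro ⟨k, h1, h2, rfl⟩
    have h2' : k ≤ s.toList.length := h2
    simp only [String.length_toList] at h2'
    have hlt : (s.toList.take k).length = k := by simp; omega
    have hne : s.toList.take k ≠ [] := by
      intro h; rw [h] at hlt; simp at hlt; omega
    constructor
    · intro h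
      apply hne
      have := congrArg String.toList h
      simpa using this
    · simp [List.take_prefix]

-- each prefix in the list is the take of its own length
theorem pvPrefs_shape (s w : String) (h : w ∈ pvPrefs [] s.toList) :
    w.toList = s.toList.take w.toList.length := by
  rcases (mem_pvPrefs s.toList [] w).mp h with ⟨k, h1, h2, rfl⟩
  simp

-- ===== VERDICT (by name: the statement is the Claim_ definition above) =====
theorem find_first_word_spec : Claim_equal_find_first_word := by
  intro s bank _
  unfold Spec_find_first_word find_first_word find_first_word_alt
  rw [pvGoA_eq_find?]
  set P := pvPrefs [] s.toList with hP
  set q : String → Bool := fun w => (!(w == "")) && PySem.Str.startswith s w with hq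
  cases hfind : P.find? (fun w => decide (w ∈ bank)) with
  | none =>
    rw [List.find?_eq_none] at hfind
    have hnil : bank.filter q = [] := by
      rw [List.filter_eq_nil_iff]
      intro w hw hqw
      exact hfind w ((pvPred_iff s w).mp hqw) (by simpa using hw)
    rw [hnil]
    exact ((PySem.List.min?_eq_none_iff _ _).mpr rfl).symm
  | some p =>
    rcases List.find?_eq_some_iff_append.mp hfind with ⟨hpbank, as, bs, hsplit, hbefore⟩
    have hpbank' : p ∈ bank := by simpa using hpbank
    have hpP : p ∈ P := by rw [hsplit]; simp
    have hpc : p ∈ bank.filter q := by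
      rw [List.mem_filter]
      exact ⟨hpbank', (pvPred_iff s p).mpr hpP⟩
    cases hm : PySem.List.min? (bank.filter q) PySem.Str.len with
    | none =>
      rw [PySem.List.min?_eq_none_iff] at hm
      rw [hm] at hpc; simp at hpc
    | some m =>
      have hmc := PySem.List.min?_mem hm
      rw [List.mem_filter] at hmc
      have hmP : m ∈ P := (pvPred_iff s m).mp hmc.2
      -- m's length ≤ p's length (m is the minimum)
      have hle1 : PySem.Str.len m ≤ PySem.Str.len p := PySem.List.min?_isMin hm p hpc
      rw [PySem.Str.len_eq, PySem.Str.len_eq] at hle1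
      -- p's length ≤ m's length (p is the first prefix in the bank, prefixes grow)
      have hle2 : p.toList.length ≤ m.toList.length := by
        have hmnotas : m ∉ as := fun hin => by
          have := hbefore m hin; simp at this; exact this hmc.1
        have hmtail : m ∈ p :: bs := by
          rw [hsplit] at hmP
          rcases List.mem_append.mp hmP with h | h
          · exact absurd h hmnotas
          · exact h
        rcases List.mem_cons.mp hmtail with rfl | hmbs
        · exact le_refl _
        · have hpw := pvPrefs_pairwise s.toList []
          rw [← hP, hsplit] at hpw
          have := (List.pairwise_append.mp hpw).2.1
          exact le_of_lt (List.rel_of_pairwise_cons this hmbs)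
      have hlen : m.toList.length = p.toList.length := by omega
      have : m.toList = p.toList := by
        rw [pvPrefs_shape s m hmP, pvPrefs_shape s p hpP, hlen]
      have : m = p := by
        have := congrArg String.ofList this; simpa using this
      rw [this]
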